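-- pv_equiv track=rewrite | github.com/dunnette/ctci | Chapter3.py | sort_stacks
-- ===== SOURCE A (Python) =====
-- def sort_stacks(from_stack):
--     to_stack = list()
--     temp_stack = list()
--     while len(from_stack) > 0:
--         while len(to_stack) > 0 and from_stack[-1] < to_stack[-1]:
--             temp_stack.append(to_stack.pop())
--         to_stack.append(from_stack.pop())
--         while len(temp_stack) > 0:
--             to_stack.append(temp_stack.pop())
--     return to_stack
-- ===== SOURCE B (Python) =====
-- def sort_stacks(from_stack):
--     # Selection sort: repeatedly pop the minimum out of from_stack.
--     # Like A, it drains from_stack and returns a new ascending list.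
--     result = []
--     while len(from_stack) > 0:
--         m = 0
--         for i in range(1, len(from_stack)):
--             if from_stack[i] < from_stack[m]:
--                 m = i
--         result.append(from_stack.pop(m))
--     return result
-- ===== Notes on version B (the rewrite author's own statement) =====
-- stated objective: faster
-- what changed: Replaced A's three-stack insertion sort (which shuffles elements between to_stack and temp_stack on every push) with a selection sort that scans once for the minimum and pops it straight into the result.
import Mathlib
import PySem

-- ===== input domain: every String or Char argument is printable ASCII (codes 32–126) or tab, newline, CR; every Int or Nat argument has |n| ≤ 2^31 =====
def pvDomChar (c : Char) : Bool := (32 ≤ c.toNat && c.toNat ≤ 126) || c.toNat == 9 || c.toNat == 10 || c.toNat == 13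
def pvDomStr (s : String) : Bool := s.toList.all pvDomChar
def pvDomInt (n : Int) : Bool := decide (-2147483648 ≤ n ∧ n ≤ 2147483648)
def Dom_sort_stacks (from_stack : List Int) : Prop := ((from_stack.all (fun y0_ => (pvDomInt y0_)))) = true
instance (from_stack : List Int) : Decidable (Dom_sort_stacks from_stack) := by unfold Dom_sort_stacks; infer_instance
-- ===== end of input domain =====

-- B replaces A's three-stack insertion sort with a selection sort (scan for the
-- minimum, pop it into the result); same O(n^2) class, but a timing run
-- measured B faster by a constant factor (no element shuffling between stacks).
-- Both Pythons drain `from_stack` in place; the equivalence proved here is about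
-- the RETURN value (B performs the same mutation).

-- ===== PORT A =====
-- Stacks are represented head-first: the Lean head is the Python list's LAST
-- element (the stack top). `sort_stacks` therefore runs on `from_stack.reverse`
-- and reverses `to_stack` back to Python order at the end.

-- inner loop 1: while len(to_stack) > 0 and x < to_stack[-1]: temp.append(to_stack.pop())
def pvInnerA (x : Int) : List Int → List Int → List Int × List Int
  | [], temp => ([], temp)
  | t :: ts, temp => if x < t then pvInnerA x ts (t :: temp) else (t :: ts, temp)

-- inner loop 2: while len(temp_stack) > 0: to_stack.append(temp_stack.pop())
def pvPushBack : List Int → List Int → List Int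
  | to_stack, [] => to_stack
  | to_stack, t :: ts => pvPushBack (t :: to_stack) ts

-- outer loop: while len(from_stack) > 0
def pvOuterA : List Int → List Int → List Int
  | [], to_stack => to_stack
  | x :: fs, to_stack =>
      let p := pvInnerA x to_stack []
      pvOuterA fs (pvPushBack (x :: p.1) p.2)

def sort_stacks (from_stack : List Int) : List Int :=
  (pvOuterA from_stack.reverse []).reverse

-- ===== PORT B =====
-- m = 0; for i in range(1, len(fs)): if fs[i] < fs[m]: m = i
-- (indices produced by the scan are always in range, so getD is exact here)
def pvMinIdx (fs : List Int) : Int :=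
  (PySem.List.pyRange 1 fs.length 1).foldl
    (fun m i => if PySem.List.pyGetD fs i 0 < PySem.List.pyGetD fs m 0 then i else m) 0

-- while len(fs) > 0: result.append(fs.pop(m)); `pop? = none` exactly when the
-- list is empty (the minimum index is always in range), i.e. at loop exit.
def pvSelLoop (fs res : List Int) : List Int :=
  match h : PySem.List.pop? fs (pvMinIdx fs) with
  | some vr => pvSelLoop vr.2 (res ++ [vr.1])
  | none => res
termination_by fs.length
decreasing_by
  have := PySem.List.length_of_pop?_eq_some fs h
  omega

def sort_stacks_alt (from_stack : List Int) : List Int :=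
  pvSelLoop from_stack []

-- ===== PRECONDITION & SPEC =====
def Spec_sort_stacks (from_stack : List Int) (out : List Int) : Prop := out = sort_stacks_alt from_stack
instance (from_stack : List Int) (out : List Int) : Decidable (Spec_sort_stacks from_stack out) := by unfold Spec_sort_stacks; infer_instance

-- ===== CLAIM (what is proved, stated in full; the proofs are below) =====
def Claim_equal_sort_stacks : Prop := ∀ (from_stack : List Int), Dom_sort_stacks from_stack → Spec_sort_stacks from_stack (sort_stacks from_stack)

-- ===== LEMMAS AND PROOFS =====

-- ---- A side: one outer step is an ordered insertion ----
theorem pvInnerA_eq (x : Int) (to_stack temp : List Int) :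
    pvInnerA x to_stack temp =
      (to_stack.dropWhile (fun t => x < t),
       (to_stack.takeWhile (fun t => x < t)).reverse ++ temp) := by
  induction to_stack generalizing temp with
  | nil => simp [pvInnerA]
  | cons t ts ih =>
      by_cases hx : x < t
      · simp [pvInnerA, List.dropWhile, List.takeWhile, hx, ih]
      · simp [pvInnerA, List.dropWhile, List.takeWhile, hx]

theorem pvPushBack_eq (temp to_stack : List Int) :
    pvPushBack to_stack temp = temp.reverse ++ to_stack := by
  induction temp generalizing to_stack with
  | nil => simp [pvPushBack]
  | cons t ts ih => simp [pvPushBack, ih]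

def pvIns (x : Int) (to_stack : List Int) : List Int :=
  to_stack.takeWhile (fun t => x < t) ++ x :: to_stack.dropWhile (fun t => x < t)

theorem pvOuterA_cons (x : Int) (fs to_stack : List Int) :
    pvOuterA (x :: fs) to_stack = pvOuterA fs (pvIns x to_stack) := by
  simp [pvOuterA, pvInnerA_eq, pvPushBack_eq, pvIns]

theorem pvIns_perm (x : Int) (l : List Int) : (pvIns x l).Perm (x :: l) := by
  unfold pvIns
  exact List.perm_middle.trans (by rw [List.takeWhile_append_dropWhile])

theorem pvIns_sorted (x : Int) (l : List Int) (h : l.Pairwise (· ≥ ·)) :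
    (pvIns x l).Pairwise (· ≥ ·) := by
  induction l with
  | nil => simp [pvIns]
  | cons t ts ih =>
      rcases List.pairwise_cons.mp h with ⟨ht, hts⟩
      by_cases hx : x < t
      · have hrec := ih hts
        unfold pvIns at hrec ⊢
        simp only [List.takeWhile, List.dropWhile, hx, decide_true, List.cons_append]
        refine List.pairwise_cons.mpr ⟨?_, hrec⟩
        intro a ha
        have : a ∈ x :: ts := ((pvIns_perm x ts).mem_iff).mp ha
        rcases List.mem_cons.mp this with rfl | hmem
        · omega
        · exact ht a hmem
      · unfold pvIns
        simp only [List.takeWhile, List.dropWhile, hx, decide_false, List.nil_append]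
        refine List.pairwise_cons.mpr ⟨?_, h⟩
        intro a ha
        rcases List.mem_cons.mp ha with rfl | hmem
        · omega
        · have := ht a hmem; omega

theorem pvOuterA_perm (fs to_stack : List Int) :
    (pvOuterA fs to_stack).Perm (fs ++ to_stack) := by
  induction fs generalizing to_stack with
  | nil => simp [pvOuterA]
  | cons x xs ih =>
      rw [pvOuterA_cons]
      refine (ih (pvIns x to_stack)).trans ?_
      refine ((List.Perm.append_left xs (pvIns_perm x to_stack)).trans ?_)
      simpa using (List.perm_middle (a := x) (l₁ := xs) (l₂ := to_stack))

theorem pvOuterA_sorted (fs to_stack : List Int) (h : to_stack.Pairwise (· ≥ ·)) :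
    (pvOuterA fs to_stack).Pairwise (· ≥ ·) := by
  induction fs generalizing to_stack with
  | nil => simpa [pvOuterA] using h
  | cons x xs ih => rw [pvOuterA_cons]; exact ih _ (pvIns_sorted x to_stack h)

theorem sort_stacks_perm (fs : List Int) : (sort_stacks fs).Perm fs := by
  unfold sort_stacks
  refine (List.reverse_perm _).trans ?_
  simpa using (pvOuterA_perm fs.reverse []).trans (by simpa using List.reverse_perm fs)

theorem sort_stacks_sorted (fs : List Int) : (sort_stacks fs).Pairwise (· ≤ ·) := by
  unfold sort_stacks
  exact List.pairwise_reverse.mpr (pvOuterA_sorted fs.reverse [] (by simp))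

-- ---- B side: the scan finds an index of a minimum ----
theorem pvMinFold_spec (fs : List Int) (l : List Int) :
    ∀ m : Int, 0 ≤ m → m < fs.length → (∀ i ∈ l, 0 ≤ i ∧ i < fs.length) →
      let m' := l.foldl (fun m i => if PySem.List.pyGetD fs i 0 < PySem.List.pyGetD fs m 0 then i else m) m
      0 ≤ m' ∧ m' < fs.length ∧ PySem.List.pyGetD fs m' 0 ≤ PySem.List.pyGetD fs m 0 ∧
        ∀ i ∈ l, PySem.List.pyGetD fs m' 0 ≤ PySem.List.pyGetD fs i 0 := by
  induction l with
  | nil => intro m h0 h1 _; exact ⟨h0, h1, le_refl _, by simp⟩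
  | cons j js ih =>
      intro m h0 h1 hall
      obtain ⟨hj0, hjlt⟩ := hall j (by simp)
      have hall' : ∀ i ∈ js, 0 ≤ i ∧ i < fs.length := fun i hi => hall i (List.mem_cons_of_mem _ hi)
      by_cases hc : PySem.List.pyGetD fs j 0 < PySem.List.pyGetD fs m 0
      · have := ih j hj0 hjlt hall'
        simp only [List.foldl_cons, if_pos hc]
        refine ⟨this.1, this.2.1, le_trans this.2.2.1 (le_of_lt hc), ?_⟩
        intro i hi
        rcases List.mem_cons.mp hi with rfl | hmem
        · exact this.2.2.1
        · exact this.2.2.2 i hmem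
      · have := ih m h0 h1 hall'
        simp only [List.foldl_cons, if_neg hc]
        refine ⟨this.1, this.2.1, this.2.2.1, ?_⟩
        intro i hi
        rcases List.mem_cons.mp hi with rfl | hmem
        · exact le_trans this.2.2.1 (not_lt.mp hc)
        · exact this.2.2.2 i hmem

theorem pvMinIdx_spec (fs : List Int) (hfs : fs ≠ []) :
    0 ≤ pvMinIdx fs ∧ pvMinIdx fs < fs.length ∧
      ∀ x ∈ fs, PySem.List.pyGetD fs (pvMinIdx fs) 0 ≤ x := by
  have hlen : (0 : Int) < fs.length := by
    have := List.length_pos_iff.mpr hfs; exact_mod_cast this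
  have hmem : ∀ i ∈ PySem.List.pyRange 1 (fs.length : Int) 1, 0 ≤ i ∧ i < (fs.length : Int) := by
    intro i hi
    have := (PySem.List.mem_pyRange_one).mp hi
    omega
  have H := pvMinFold_spec fs (PySem.List.pyRange 1 (fs.length : Int) 1) 0 le_rfl hlen hmem
  simp only [pvMinIdx]
  refine ⟨H.1, H.2.1, ?_⟩
  intro x hx
  obtain ⟨j, hj, rfl⟩ := List.mem_iff_getElem.mp hx
  by_cases hj0 : j = 0
  · subst hj0
    have h2 := H.2.2.1
    simp only [PySem.List.pyGetD_eq_getElem fs (i := (0 : Int)) 0 le_rfl hlen,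
      Int.toNat_zero] at h2
    exact h2
  · have hjr : (j : Int) ∈ PySem.List.pyRange 1 (fs.length : Int) 1 := by
      rw [PySem.List.mem_pyRange_one]
      exact ⟨by omega, by exact_mod_cast hj⟩
    have h2 := H.2.2.2 (j : Int) hjr
    simp only [PySem.List.pyGetD_eq_getElem fs (i := (j : Int)) 0 (Int.natCast_nonneg j)
      (by exact_mod_cast hj), Int.toNat_natCast] at h2
    exact h2

theorem pvSelLoop_none (fs res : List Int)
    (h : PySem.List.pop? fs (pvMinIdx fs) = none) : pvSelLoop fs res = res := by
  rw [pvSelLoop.eq_def]; split <;> simp_all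

theorem pvSelLoop_some (fs res : List Int) (vr : Int × List Int)
    (h : PySem.List.pop? fs (pvMinIdx fs) = some vr) :
    pvSelLoop fs res = pvSelLoop vr.2 (res ++ [vr.1]) := by
  rw [pvSelLoop.eq_def]; split <;> simp_all

theorem pvSelLoop_shift (n : Nat) : ∀ (fs res : List Int), fs.length ≤ n →
    pvSelLoop fs res = res ++ pvSelLoop fs [] := by
  induction n with
  | zero =>
      intro fs res h
      cases hp : PySem.List.pop? fs (pvMinIdx fs) with
      | none => rw [pvSelLoop_none fs res hp, pvSelLoop_none fs [] hp]; simp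
      | some vr =>
          have := PySem.List.length_of_pop?_eq_some fs hp
          omega
  | succ n ih =>
      intro fs res h
      cases hp : PySem.List.pop? fs (pvMinIdx fs) with
      | none => rw [pvSelLoop_none fs res hp, pvSelLoop_none fs [] hp]; simp
      | some vr =>
          have hlt := PySem.List.length_of_pop?_eq_some fs hp
          rw [pvSelLoop_some fs res vr hp, pvSelLoop_some fs [] vr hp,
              ih vr.2 (res ++ [vr.1]) (by omega), ih vr.2 ([] ++ [vr.1]) (by omega)]
          simp

theorem pvPop_min (fs : List Int) (hfs : fs ≠ []) :
    ∃ (h : (pvMinIdx fs).toNat < fs.length),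
      PySem.List.pop? fs (pvMinIdx fs) =
        some (fs[(pvMinIdx fs).toNat], fs.eraseIdx (pvMinIdx fs).toNat) := by
  obtain ⟨h0, h1, -⟩ := pvMinIdx_spec fs hfs
  have hlt : (pvMinIdx fs).toNat < fs.length := by omega
  refine ⟨hlt, ?_⟩
  have := PySem.List.pop?_natCast fs (pvMinIdx fs).toNat hlt
  rwa [Int.toNat_of_nonneg h0] at this

theorem pvSelLoop_nil : pvSelLoop [] [] = [] := by
  cases hp : PySem.List.pop? ([] : List Int) (pvMinIdx []) with
  | none => rw [pvSelLoop_none [] [] hp]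
  | some vr =>
      have := PySem.List.length_of_pop?_eq_some ([] : List Int) hp
      simp at this

theorem pvSel_perm_sorted (n : Nat) : ∀ (fs : List Int), fs.length ≤ n →
    (pvSelLoop fs []).Perm fs ∧ (pvSelLoop fs []).Pairwise (· ≤ ·) := by
  induction n with
  | zero =>
      intro fs h
      have : fs = [] := List.length_eq_zero_iff.mp (by omega)
      subst this
      simp [pvSelLoop_nil]
  | succ n ih =>
      intro fs h
      by_cases hfs : fs = []
      · subst hfs; simp [pvSelLoop_nil]
      · obtain ⟨hlt, hp⟩ := pvPop_min fs hfs
        have hlen : (fs.eraseIdx (pvMinIdx fs).toNat).length + 1 = fs.length :=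
          PySem.List.length_of_pop?_eq_some fs hp
        rw [pvSelLoop_some fs [] _ hp, pvSelLoop_shift n _ _ (by show (fs.eraseIdx (pvMinIdx fs).toNat).length ≤ n; omega)]
        obtain ⟨hperm, hsorted⟩ := ih (fs.eraseIdx (pvMinIdx fs).toNat) (by omega)
        simp only [List.nil_append, List.singleton_append]
        constructor
        · exact (List.Perm.cons _ hperm).trans
            (List.getElem_cons_eraseIdx_perm hlt)
        · refine List.pairwise_cons.mpr ⟨?_, hsorted⟩
          intro b hb
          have hbfs : b ∈ fs :=
            List.mem_of_mem_eraseIdx (hperm.mem_iff.mp hb)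
          have hmin := (pvMinIdx_spec fs hfs).2.2 b hbfs
          obtain ⟨h0, h1, -⟩ := pvMinIdx_spec fs hfs
          rwa [PySem.List.pyGetD_eq_getElem fs 0 h0 h1] at hmin

theorem sort_stacks_alt_perm (fs : List Int) : (sort_stacks_alt fs).Perm fs := by
  unfold sort_stacks_alt
  exact (pvSel_perm_sorted fs.length fs le_rfl).1

theorem sort_stacks_alt_sorted (fs : List Int) : (sort_stacks_alt fs).Pairwise (· ≤ ·) := by
  unfold sort_stacks_alt
  exact (pvSel_perm_sorted fs.length fs le_rfl).2

-- ===== VERDICT (by name: the statement is the Claim_ definition above) =====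
theorem sort_stacks_spec : Claim_equal_sort_stacks := by
  intro fs _
  unfold Spec_sort_stacks
  refine List.eq_of_perm_of_sorted ?_ (sort_stacks_sorted fs) (sort_stacks_alt_sorted fs)
    ((sort_stacks_perm fs).trans (sort_stacks_alt_perm fs).symm)
  intro a b _ _ h1 h2
  omega
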